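-- pv_equiv track=rewrite | github.com/Sampson-Lee/SocialEmotion | collect_crawler.py | resolve_emotions
-- ===== SOURCE A (Python) =====
-- from typing import Collection, Dict, Iterable, List, Optional
--
-- SUPPORTED_EMOTIONS = [
--     "embarrassment",
--     "guilt",
--     "jealousy",
--     "pride",
-- ]
--
-- EMOTION_HELP_TEXT = ", ".join(SUPPORTED_EMOTIONS)
--
-- def dedupe_preserve(values: Iterable[str]) -> List[str]:
--     seen = set()
--     result: List[str] = []
--     for value in values:
--         normalized = (value or "").strip()
--         if not normalized:
--             continue
--         key = normalized.lower()
--         if key in seen: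
--             continue
--         seen.add(key)
--         result.append(normalized)
--     return result
--
-- def resolve_emotions(
--     emotions: Optional[List[str]],
--     all_emotions: bool,
-- ) -> List[str]:
--     candidates: List[str] = []
--     if all_emotions:
--         candidates.extend(SUPPORTED_EMOTIONS)
--     if emotions:
--         candidates.extend(emotions)
--     resolved = dedupe_preserve(candidates)
--     if not resolved:
--         raise SystemExit(
--             "Provide --emotions or --all-emotions so the crawler knows which feelings to target."
--         )
--     canonical: List[str] = []
--     seen = set()
--     unsupported: List[str] = []
--     for item in resolved:
--         key = (item or "").strip().lower()
--         if not key: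
--             continue
--         if key not in SUPPORTED_EMOTIONS:
--             unsupported.append(item)
--             continue
--         if key in seen:
--             continue
--         seen.add(key)
--         canonical.append(key)
--     if unsupported:
--         raise SystemExit(
--             f"Unsupported emotion(s): {', '.join(unsupported)}. Supported: {EMOTION_HELP_TEXT}."
--         )
--     if not canonical:
--         raise SystemExit(f"No supported emotions selected. Supported: {EMOTION_HELP_TEXT}.")
--     return canonical
-- ===== SOURCE B (Python) =====
-- from typing import List, Optional
--
-- SUPPORTED_EMOTIONS = [
--     "embarrassment",
--     "guilt",
--     "jealousy",
--     "pride",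
-- ]
--
-- EMOTION_HELP_TEXT = ", ".join(SUPPORTED_EMOTIONS)
--
--
-- def resolve_emotions(
--     emotions: Optional[List[str]],
--     all_emotions: bool,
-- ) -> List[str]:
--     candidates = (SUPPORTED_EMOTIONS if all_emotions else []) + (emotions or [])
--     seen = set()
--     canonical: List[str] = []
--     unsupported: List[str] = []
--     any_candidate = False
--     for value in candidates:
--         normalized = (value or "").strip()
--         if not normalized:
--             continue
--         any_candidate = True
--         key = normalized.lower()
--         if key in seen:
--             continue
--         seen.add(key)
--         if key in SUPPORTED_EMOTIONS:
--             canonical.append(key)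
--         else:
--             unsupported.append(normalized)
--     if not any_candidate:
--         raise SystemExit(
--             "Provide --emotions or --all-emotions so the crawler knows which feelings to target."
--         )
--     if unsupported:
--         raise SystemExit(
--             f"Unsupported emotion(s): {', '.join(unsupported)}. Supported: {EMOTION_HELP_TEXT}."
--         )
--     return canonical
-- ===== Notes on version B (the rewrite author's own statement) =====
-- stated objective: simpler
-- what changed: A's two sequential passes (a dedupe helper building an intermediate list, then a second validate/re-dedupe loop with its own seen set and empty checks) are fused into one single pass over the candidate list that dedupes and classifies each candidate as supported/unsupported on first sight, eliminating the intermediate list and the dead second-pass empty checks.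
import Mathlib
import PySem

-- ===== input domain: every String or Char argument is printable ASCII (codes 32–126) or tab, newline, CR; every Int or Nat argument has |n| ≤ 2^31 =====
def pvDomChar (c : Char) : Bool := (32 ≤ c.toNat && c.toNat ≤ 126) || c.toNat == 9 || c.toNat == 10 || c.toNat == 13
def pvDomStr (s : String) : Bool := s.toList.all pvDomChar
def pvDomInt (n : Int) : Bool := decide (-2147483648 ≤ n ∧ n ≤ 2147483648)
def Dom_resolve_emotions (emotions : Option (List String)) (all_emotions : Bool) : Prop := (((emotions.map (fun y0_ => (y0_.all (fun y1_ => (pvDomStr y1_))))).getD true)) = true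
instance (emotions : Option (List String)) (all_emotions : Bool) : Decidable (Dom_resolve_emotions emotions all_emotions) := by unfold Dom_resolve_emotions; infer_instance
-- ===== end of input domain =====

-- B fuses A's two sequential passes (dedupe helper + validate loop) into one single pass that
-- dedupes and classifies each candidate on first sight; same return value, objective: simpler.


def supportedEmotions : List String := ["embarrassment", "guilt", "jealousy", "pride"]

-- ===== PORT A =====
-- loop body of dedupe_preserve; state = (seen, result)
def stepDedupe (st : PySem.Set String × List String) (value : String) :
    PySem.Set String × List String :=
  let normalized := PySem.Str.strip value    -- (value or "").strip(); value is a str, '' strips to ''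
  if normalized = "" then st
  else
    let key := PySem.Str.lower normalized
    if PySem.Set.contains st.1 key then st
    else (PySem.Set.add st.1 key, st.2 ++ [normalized])

def dedupe_preserve (values : List String) : List String :=
  (values.foldl stepDedupe (PySem.Set.empty, [])).2

-- loop body of A's validate loop; state = (canonical, seen, unsupported)
def stepValidate (st : List String × PySem.Set String × List String) (item : String) :
    List String × PySem.Set String × List String :=
  let key := PySem.Str.lower (PySem.Str.strip item)   -- (item or "").strip().lower()
  if key = "" then st
  else if !(supportedEmotions.contains key) then (st.1, st.2.1, st.2.2 ++ [item])
  else if PySem.Set.contains st.2.1 key then st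
  else (st.1 ++ [key], PySem.Set.add st.2.1 key, st.2.2)

def resolve_emotions (emotions : Option (List String)) (all_emotions : Bool) : List String :=
  let candidates : List String :=
    (if all_emotions then supportedEmotions else []) ++ emotions.getD []
    -- 'if emotions: candidates.extend(emotions)': extending by [] (None or empty list) is a no-op
  let resolved := dedupe_preserve candidates
  -- 'if not resolved: raise SystemExit(...)': excluded by Pre_resolve_emotions
  let st := resolved.foldl stepValidate ([], PySem.Set.empty, [])
  -- 'if unsupported: raise' / 'if not canonical: raise': excluded by Pre_resolve_emotions
  st.1

-- ===== PORT B =====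
-- loop body of B's single fused pass; state = (seen, canonical, unsupported, any_candidate)
def stepFused (st : PySem.Set String × List String × List String × Bool) (value : String) :
    PySem.Set String × List String × List String × Bool :=
  let normalized := PySem.Str.strip value
  if normalized = "" then st
  else
    let key := PySem.Str.lower normalized
    if PySem.Set.contains st.1 key then (st.1, st.2.1, st.2.2.1, true)
    else if supportedEmotions.contains key then
      (PySem.Set.add st.1 key, st.2.1 ++ [key], st.2.2.1, true)
    else (PySem.Set.add st.1 key, st.2.1, st.2.2.1 ++ [normalized], true)

def resolve_emotions_alt (emotions : Option (List String)) (all_emotions : Bool) : List String :=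
  let candidates : List String :=
    (if all_emotions then supportedEmotions else []) ++ emotions.getD []
  let st := candidates.foldl stepFused (PySem.Set.empty, [], [], false)
  -- 'if not any_candidate: raise' / 'if unsupported: raise': excluded by Pre_resolve_emotions
  st.2.1

-- ===== PRECONDITION & SPEC =====
-- Pre_ = exactly the inputs on which Python A returns (no SystemExit): at least one candidate is
-- non-empty after stripping, and every non-empty stripped candidate lowercases to a supported emotion.
def Pre_resolve_emotions (emotions : Option (List String)) (all_emotions : Bool) : Prop :=
  let cs : List String := (if all_emotions then supportedEmotions else []) ++ emotions.getD []
  (∃ v ∈ cs, PySem.Str.strip v ≠ "") ∧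
  (∀ v ∈ cs, PySem.Str.strip v ≠ "" →
    supportedEmotions.contains (PySem.Str.lower (PySem.Str.strip v)) = true)
instance (emotions : Option (List String)) (all_emotions : Bool) : Decidable (Pre_resolve_emotions emotions all_emotions) := by unfold Pre_resolve_emotions; infer_instance

def pvWitness_resolve_emotions : Option (List String) × Bool := (some [" Guilt ", "pride"], false)

def Spec_resolve_emotions (emotions : Option (List String)) (all_emotions : Bool) (out : List String) : Prop := out = resolve_emotions_alt emotions all_emotions
instance (emotions : Option (List String)) (all_emotions : Bool) (out : List String) : Decidable (Spec_resolve_emotions emotions all_emotions out) := by unfold Spec_resolve_emotions; infer_instance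

-- ===== CLAIM (what is proved, stated in full; the proofs are below) =====
def Claim_equal_resolve_emotions : Prop := ∀ (emotions : Option (List String)) (all_emotions : Bool), Dom_resolve_emotions emotions all_emotions → Pre_resolve_emotions emotions all_emotions → Spec_resolve_emotions emotions all_emotions (resolve_emotions emotions all_emotions)

-- ===== LEMMAS AND PROOFS =====

-- the first-occurrence dedup skeleton both passes follow (collects the stripped forms)
def ddSkel (s : PySem.Set String) : List String → List String
  | [] => []
  | v :: vs =>
    let n := PySem.Str.strip v
    if n = "" then ddSkel s vs
    else if PySem.Set.contains s (PySem.Str.lower n) then ddSkel s vs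
    else n :: ddSkel (PySem.Set.add s (PySem.Str.lower n)) vs

-- step-evaluation lemmas
lemma stepDedupe_empty {st v} (h : PySem.Str.strip v = "") : stepDedupe st v = st := by
  simp [stepDedupe, h]

lemma stepDedupe_seen {st : PySem.Set String × List String} {v} (h1 : PySem.Str.strip v ≠ "")
    (h2 : PySem.Str.lower (PySem.Str.strip v) ∈ st.1) :
    stepDedupe st v = st := by
  simp [stepDedupe, h1, h2]

lemma stepDedupe_new {st : PySem.Set String × List String} {v} (h1 : PySem.Str.strip v ≠ "")
    (h2 : PySem.Str.lower (PySem.Str.strip v) ∉ st.1) :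
    stepDedupe st v =
      (PySem.Set.add st.1 (PySem.Str.lower (PySem.Str.strip v)), st.2 ++ [PySem.Str.strip v]) := by
  simp [stepDedupe, h1, h2]

lemma ddSkel_nil (s : PySem.Set String) : ddSkel s [] = [] := rfl

lemma ddSkel_cons_empty {s v vs} (h : PySem.Str.strip v = "") :
    ddSkel s (v :: vs) = ddSkel s vs := by simp [ddSkel, h]

lemma ddSkel_cons_seen {s : PySem.Set String} {v vs} (h1 : PySem.Str.strip v ≠ "")
    (h2 : PySem.Str.lower (PySem.Str.strip v) ∈ s) :
    ddSkel s (v :: vs) = ddSkel s vs := by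
  simp [ddSkel, h1, h2]

lemma ddSkel_cons_new {s : PySem.Set String} {v vs} (h1 : PySem.Str.strip v ≠ "")
    (h2 : PySem.Str.lower (PySem.Str.strip v) ∉ s) :
    ddSkel s (v :: vs) =
      PySem.Str.strip v :: ddSkel (PySem.Set.add s (PySem.Str.lower (PySem.Str.strip v))) vs := by
  simp [ddSkel, h1, h2]

lemma dropWhile_eq_self_of_prefix (p : Char → Bool) {l t : List Char}
    (hl : l.dropWhile p = l) (ht : t <+: l) : t.dropWhile p = t := by
  cases t with
  | nil => simp
  | cons a u =>
    obtain ⟨r, hr⟩ := ht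
    subst hr
    have hl' : List.dropWhile p (a :: (u ++ r)) = a :: (u ++ r) := by simpa using hl
    have hpa : p a = false := by
      cases hpa : p a
      · rfl
      · rw [List.dropWhile_cons_of_pos hpa] at hl'
        have h1 := List.length_dropWhile_le p (u ++ r)
        have h2 := congrArg List.length hl'
        simp [List.length_append] at h1 h2; omega
    simp [hpa]

lemma chars_strip_idem (cs : List Char) :
    PySem.Chars.strip (PySem.Chars.strip cs) = PySem.Chars.strip cs := by
  unfold PySem.Chars.strip PySem.Chars.rstrip PySem.Chars.lstrip
  set p := PySem.Chars.isspace
  set t := cs.dropWhile p with ht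
  have h1 : t.dropWhile p = t := by rw [ht]; exact List.dropWhile_idempotent p cs
  have hpre : (t.reverse.dropWhile p).reverse <+: t := by
    have h := List.dropWhile_suffix (l := t.reverse) p
    have := List.reverse_prefix.mpr (by simpa using h)
    simpa using this
  rw [dropWhile_eq_self_of_prefix p h1 hpre]
  rw [List.reverse_reverse, List.dropWhile_idempotent]

lemma str_strip_idem (s : String) :
    PySem.Str.strip (PySem.Str.strip s) = PySem.Str.strip s := by
  have h := chars_strip_idem s.toList
  apply String.toList_injective
  simpa using h

lemma str_lower_eq_empty_iff (s : String) : PySem.Str.lower s = "" ↔ s = "" := by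
  constructor
  · intro h
    have h2 := congrArg String.toList h
    simp [PySem.Chars.lower] at h2
    apply String.toList_injective; simp [h2]
  · intro h; subst h; rfl

-- characterization of A's dedupe fold
lemma dedupe_fold_eq (vs : List String) :
    ∀ (s : PySem.Set String) (r : List String),
    (vs.foldl stepDedupe (s, r)).2 = r ++ ddSkel s vs := by
  induction vs with
  | nil => intro s r; simp [ddSkel_nil]
  | cons v vs ih =>
    intro s r
    rw [List.foldl_cons]
    by_cases h1 : PySem.Str.strip v = ""
    · rw [stepDedupe_empty h1, ddSkel_cons_empty h1]; exact ih s r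
    · by_cases h2 : PySem.Str.lower (PySem.Str.strip v) ∈ s
      · rw [stepDedupe_seen h1 h2, ddSkel_cons_seen h1 h2]; exact ih s r
      ·
        rw [stepDedupe_new (st := (s, r)) h1 h2, ddSkel_cons_new h1 h2, ih]
        simp

-- every element of ddSkel is a stripped form; under Pre_'s ∀ it is non-empty and supported
lemma ddSkel_elems (vs : List String)
    (H : ∀ v ∈ vs, PySem.Str.strip v ≠ "" →
      supportedEmotions.contains (PySem.Str.lower (PySem.Str.strip v)) = true) :
    ∀ (s : PySem.Set String), ∀ x ∈ ddSkel s vs,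
      PySem.Str.strip x = x ∧ x ≠ "" ∧ supportedEmotions.contains (PySem.Str.lower x) = true := by
  induction vs with
  | nil => intro s x hx; simp [ddSkel_nil] at hx
  | cons v vs ih =>
    intro s x hx
    have Hv := H v (by simp)
    have Hvs : ∀ w ∈ vs, PySem.Str.strip w ≠ "" →
        supportedEmotions.contains (PySem.Str.lower (PySem.Str.strip w)) = true :=
      fun w hw => H w (by simp [hw])
    by_cases h1 : PySem.Str.strip v = ""
    · rw [ddSkel_cons_empty h1] at hx; exact ih Hvs s x hx
    · by_cases h2 : PySem.Str.lower (PySem.Str.strip v) ∈ s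
      · rw [ddSkel_cons_seen h1 h2] at hx; exact ih Hvs s x hx
      ·
        rw [ddSkel_cons_new h1 h2] at hx
        rcases List.mem_cons.mp hx with hx | hx
        · subst hx
          exact ⟨str_strip_idem v, h1, Hv h1⟩
        · exact ih Hvs _ x hx

-- the lowered keys of ddSkel are distinct and avoid the starting seen set
lemma ddSkel_keys_nodup (vs : List String) :
    ∀ (s : PySem.Set String),
      ((ddSkel s vs).map (fun x => PySem.Str.lower (PySem.Str.strip x))).Nodup ∧
      (∀ x ∈ ddSkel s vs, PySem.Str.lower (PySem.Str.strip x) ∉ s) := by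
  induction vs with
  | nil => intro s; simp [ddSkel_nil]
  | cons v vs ih =>
    intro s
    by_cases h1 : PySem.Str.strip v = ""
    · rw [ddSkel_cons_empty h1]; exact ih s
    · by_cases h2 : PySem.Str.lower (PySem.Str.strip v) ∈ s
      · rw [ddSkel_cons_seen h1 h2]; exact ih s
      ·
        rw [ddSkel_cons_new h1 h2]
        have hnot : PySem.Str.lower (PySem.Str.strip v) ∉ s := h2
        obtain ⟨ihnd, ihmem⟩ := ih (PySem.Set.add s (PySem.Str.lower (PySem.Str.strip v)))
        have hkeyv : PySem.Str.lower (PySem.Str.strip (PySem.Str.strip v))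
            = PySem.Str.lower (PySem.Str.strip v) := by rw [str_strip_idem]
        constructor
        · rw [List.map_cons, List.nodup_cons]
          refine ⟨?_, ihnd⟩
          intro hmem
          obtain ⟨x, hx, hkx⟩ := List.mem_map.mp hmem
          have hm := ihmem x hx
          rw [hkx, hkeyv] at hm
          exact hm ((PySem.Set.mem_add _ _ _).mpr (Or.inr rfl))
        · intro x hx
          rcases List.mem_cons.mp hx with hx | hx
          · subst hx; rw [hkeyv]; exact hnot
          · intro hmem
            exact ihmem x hx ((PySem.Set.mem_add _ _ _).mpr (Or.inl hmem))

-- A's second pass over a deduped, all-supported list lowercases it elementwise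
lemma second_pass_eq (items : List String) :
    ∀ (c : List String) (seen : PySem.Set String) (u : List String),
    (∀ x ∈ items, PySem.Str.strip x = x ∧ x ≠ "" ∧
      supportedEmotions.contains (PySem.Str.lower x) = true) →
    ((items.map (fun x => PySem.Str.lower (PySem.Str.strip x))).Nodup) →
    (∀ x ∈ items, PySem.Str.lower (PySem.Str.strip x) ∉ seen) →
    (items.foldl stepValidate (c, seen, u)).1 = c ++ items.map PySem.Str.lower := by
  induction items with
  | nil => intro c seen u _ _ _; simp
  | cons x xs ih =>
    intro c seen u hall hnd hseen
    obtain ⟨hstr, hne, hsup⟩ := hall x (by simp)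
    have hkey : PySem.Str.lower (PySem.Str.strip x) = PySem.Str.lower x := by rw [hstr]
    have hkne : PySem.Str.lower x ≠ "" := fun h => hne ((str_lower_eq_empty_iff x).mp h)
    have hxseen : PySem.Str.lower x ∉ seen := by
      have := hseen x (by simp); rwa [hkey] at this
    have hstep : stepValidate (c, seen, u) x =
        (c ++ [PySem.Str.lower x], PySem.Set.add seen (PySem.Str.lower x), u) := by
      have hs : PySem.Str.lower x ∈ supportedEmotions := List.contains_iff_mem.mp hsup
      simp [stepValidate, hkey, hkne, hs, hxseen]
    rw [List.map_cons] at hnd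
    obtain ⟨hhead, htail⟩ := List.nodup_cons.mp hnd
    rw [List.foldl_cons, hstep,
      ih (c ++ [PySem.Str.lower x]) (PySem.Set.add seen (PySem.Str.lower x)) u
        (fun y hy => hall y (by simp [hy])) htail ?_]
    · simp
    · intro y hy hmem
      rcases (PySem.Set.mem_add seen (PySem.Str.lower x) _).mp hmem with h | h
      · exact hseen y (by simp [hy]) h
      · rw [hkey] at hhead
        exact hhead (h ▸ List.mem_map.mpr ⟨y, hy, rfl⟩)

-- B's single pass produces the lowered ddSkel directly (no unsupported branch fires under Pre_'s ∀)
lemma alt_fold_eq (vs : List String)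
    (H : ∀ v ∈ vs, PySem.Str.strip v ≠ "" →
      supportedEmotions.contains (PySem.Str.lower (PySem.Str.strip v)) = true) :
    ∀ (s : PySem.Set String) (c u : List String) (a : Bool),
    (vs.foldl stepFused (s, c, u, a)).2.1 = c ++ (ddSkel s vs).map PySem.Str.lower := by
  induction vs with
  | nil => intro s c u a; simp [ddSkel_nil]
  | cons v vs ih =>
    intro s c u a
    have Hv := fun h => H v (by simp) h
    have Hvs : ∀ w ∈ vs, PySem.Str.strip w ≠ "" →
        supportedEmotions.contains (PySem.Str.lower (PySem.Str.strip w)) = true :=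
      fun w hw => H w (by simp [hw])
    rw [List.foldl_cons]
    by_cases h1 : PySem.Str.strip v = ""
    · have hstep : stepFused (s, c, u, a) v = (s, c, u, a) := by simp [stepFused, h1]
      rw [hstep, ddSkel_cons_empty h1]; exact ih Hvs s c u a
    · by_cases h2 : PySem.Str.lower (PySem.Str.strip v) ∈ s
      ·
        have hstep : stepFused (s, c, u, a) v = (s, c, u, true) := by
          simp [stepFused, h1, h2]
        rw [hstep, ddSkel_cons_seen h1 h2]; exact ih Hvs s c u true
      ·
        have hstep : stepFused (s, c, u, a) v =
            (PySem.Set.add s (PySem.Str.lower (PySem.Str.strip v)),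
             c ++ [PySem.Str.lower (PySem.Str.strip v)], u, true) := by
          have hs : PySem.Str.lower (PySem.Str.strip v) ∈ supportedEmotions :=
            List.contains_iff_mem.mp (Hv h1)
          simp [stepFused, h1, h2, hs]
        rw [hstep, ddSkel_cons_new h1 h2, ih Hvs]
        simp

-- ===== VERDICT (by name: the statement is the Claim_ definition above) =====
theorem resolve_emotions_spec : Claim_equal_resolve_emotions := by
  intro emotions all_emotions _hdom hpre
  obtain ⟨_hne, hsup⟩ := hpre
  unfold Spec_resolve_emotions
  show (List.foldl stepValidate ([], PySem.Set.empty, [])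
      ((List.foldl stepDedupe (PySem.Set.empty, [])
        ((if all_emotions then supportedEmotions else []) ++ emotions.getD [])).2)).1
    = (List.foldl stepFused (PySem.Set.empty, [], [], false)
        ((if all_emotions then supportedEmotions else []) ++ emotions.getD [])).2.1
  rw [dedupe_fold_eq, alt_fold_eq _ hsup, List.nil_append, List.nil_append]
  obtain ⟨hnd, hdisj⟩ := ddSkel_keys_nodup
    ((if all_emotions then supportedEmotions else []) ++ emotions.getD []) PySem.Set.empty
  exact second_pass_eq _ [] PySem.Set.empty []
    (ddSkel_elems _ hsup PySem.Set.empty) hnd hdisj
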